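-- pv_equiv track=rewrite | github.com/ianmnz/adventofcode | src/y2025/d11.py | get_nb_paths_with_stops
-- ===== SOURCE A (Python) =====
-- from collections import defaultdict, deque
--
-- Graph = dict[str, list[str]]
--
-- def topological_sort(graph: Graph) -> list[str]:
--     in_degree = defaultdict(int)
--     for u in graph:
--         for v in graph[u]:
--             in_degree[v] += 1
--
--     queue = deque((u for u in graph if in_degree[u] == 0))
--     order = []
--
--     while queue:
--         u = queue.popleft()
--         order.append(u)
--
--         for v in graph.get(u, []):
--             in_degree[v] -= 1
--             if not in_degree[v]:
--                 queue.append(v)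
--
--     return order
--
-- def get_nb_paths_with_stops(graph: Graph, s: str, t: str, stops: set[str]) -> int:
--     stop_idx = {u: i for i, u in enumerate(stops)}
--     full_mask = (1 << len(stops)) - 1
--
--     topo = topological_sort(graph)
--     dp = defaultdict(lambda: defaultdict(int))
--
--     initial_mask = 0
--     if s in stops:
--         initial_mask |= 1 << stop_idx[s]
--     dp[s][initial_mask] = 1
--
--     for u in topo:
--         for mask, count in dp[u].items():
--             for v in graph.get(u, []):
--                 next_mask = mask
--                 if v in stop_idx:
--                     next_mask |= 1 << stop_idx[v]
--                 dp[v][next_mask] += count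
--
--     return dp[t][full_mask]
-- ===== SOURCE B (Python) =====
-- from collections import defaultdict, deque
--
--
-- def topological_sort(graph):
--     in_degree = defaultdict(int)
--     for u in graph:
--         for v in graph[u]:
--             in_degree[v] += 1
--
--     queue = deque((u for u in graph if in_degree[u] == 0))
--     order = []
--
--     while queue:
--         u = queue.popleft()
--         order.append(u)
--
--         for v in graph.get(u, []):
--             in_degree[v] -= 1
--             if not in_degree[v]:
--                 queue.append(v)
--
--     return order
--
--
-- def _subsets(xs):
--     if not xs:
--         return [[]]
--     rest = _subsets(xs[1:])
--     return rest + [[xs[0]] + ys for ys in rest]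
--
--
-- def _count_paths_avoiding(graph, topo, s, t, excluded):
--     # standard DAG path count along a topological order, skipping excluded nodes
--     if s in excluded:
--         return 0
--     count = {s: 1}
--     for u in topo:
--         c = count.get(u, 0)
--         for v in graph.get(u, []):
--             if v not in excluded:
--                 count[v] = count.get(v, 0) + c
--     return count.get(t, 0)
--
--
-- def get_nb_paths_with_stops(graph, s, t, stops):
--     # inclusion-exclusion over subsets of the required stops:
--     # paths visiting every stop = sum over subsets S of (-1)^|S| * (paths avoiding S)
--     topo = topological_sort(graph)
--     total = 0
--     for sub in _subsets(list(stops)):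
--         total += (-1) ** len(sub) * _count_paths_avoiding(graph, topo, s, t, set(sub))
--     return total
-- ===== Notes on version B (the rewrite author's own statement) =====
-- stated objective: alternative
-- what changed: Replaces the single visited-stops-bitmask DP (a dict of mask->count per node threaded through the topological order) by inclusion-exclusion: B enumerates the subsets S of the stop set and sums (-1)^|S| times a plain mask-free s->t path count along the same topological order that skips the nodes of S.
import Mathlib
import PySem

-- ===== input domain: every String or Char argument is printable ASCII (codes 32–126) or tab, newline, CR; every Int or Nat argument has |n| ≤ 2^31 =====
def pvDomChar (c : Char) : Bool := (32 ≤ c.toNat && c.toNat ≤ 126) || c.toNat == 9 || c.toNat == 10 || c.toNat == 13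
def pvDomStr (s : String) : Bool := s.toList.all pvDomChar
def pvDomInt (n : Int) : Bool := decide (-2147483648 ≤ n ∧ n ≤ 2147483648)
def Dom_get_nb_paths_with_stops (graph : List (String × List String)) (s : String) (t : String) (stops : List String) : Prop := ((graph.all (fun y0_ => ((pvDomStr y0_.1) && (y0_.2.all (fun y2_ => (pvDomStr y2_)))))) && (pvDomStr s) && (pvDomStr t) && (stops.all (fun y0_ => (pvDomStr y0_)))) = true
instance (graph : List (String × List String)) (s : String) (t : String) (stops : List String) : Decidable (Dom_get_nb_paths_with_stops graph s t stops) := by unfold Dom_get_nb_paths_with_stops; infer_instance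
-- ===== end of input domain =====

-- B replaces A's visited-stops-bitmask DP threaded along the topological order by
-- inclusion-exclusion over subsets of the stop set, each counted by a plain mask-free
-- path count along the same order (objective: alternative; not claimed faster).

-- ===== PORT A =====
-- graph.get(u, []) on the Python dict (used by both sources)
def pvAdj (g : PySem.Dict String (List String)) (u : String) : List String :=
  (g.get? u).getD []

-- "for v in graph.get(u, []): in_degree[v] -= 1; if not in_degree[v]: queue.append(v)"
def pvKahnRelax (g : PySem.Dict String (List String)) (u : String)
    (st : PySem.Dict String Int × List String) : PySem.Dict String Int × List String :=
  (pvAdj g u).foldl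
    (fun st v =>
      let indeg := st.1.modify v 0 (· - 1)
      if indeg.getD v 0 == 0 then (indeg, st.2 ++ [v]) else (indeg, st.2))
    st

-- the 'while queue' loop of topological_sort; the fuel only makes the recursion
-- structural and is large enough for every reachable state (each iteration pops one
-- of at most size + Σ|adj| ever-queued elements)
def pvKahnLoop (g : PySem.Dict String (List String)) :
    Nat → List String → PySem.Dict String Int → List String → List String
  | 0, _, _, order => order
  | _ + 1, [], _, order => order
  | fuel + 1, u :: queue, indeg, order =>
    let st := pvKahnRelax g u (indeg, queue)
    pvKahnLoop g fuel st.2 st.1 (order ++ [u])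

-- topological_sort (identical helper in both Python sources; shared here)
def pvTopologicalSort (g : PySem.Dict String (List String)) : List String :=
  let indeg :=
    g.items.foldl (fun d p => p.2.foldl (fun d v => d.modify v 0 (· + 1)) d)
      PySem.Dict.empty
  let queue := g.keys.filter (fun u => indeg.getD u 0 == 0)
  pvKahnLoop g (g.size + (g.values.map List.length).sum + 1) queue indeg []

-- stop_idx = {u: i for i, u in enumerate(stops)}; indices/masks are nonnegative, kept as Nat
def pvStopIdx (stopsS : PySem.Set String) : PySem.Dict String Nat :=
  (stopsS.foldl (fun (p : PySem.Dict String Nat × Nat) u => (p.1.insert u p.2, p.2 + 1))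
    (PySem.Dict.empty, 0)).1

-- initial_mask = 0; if s in stops: initial_mask |= 1 << stop_idx[s]
def pvInitMask (stopsS : PySem.Set String) (s : String) : Nat :=
  if PySem.Set.contains stopsS s then 0 ||| (1 <<< (pvStopIdx stopsS).getD s 0) else 0

-- dp = defaultdict(...); dp[s][initial_mask] = 1
def pvDP0 (stopsS : PySem.Set String) (s : String) : PySem.Dict String (PySem.Dict Nat Int) :=
  PySem.Dict.empty.modify s PySem.Dict.empty (fun inner => inner.insert (pvInitMask stopsS s) 1)

-- next_mask = mask; if v in stop_idx: next_mask |= 1 << stop_idx[v]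
def pvNextMask (SI : PySem.Dict String Nat) (m1 : Nat) (v : String) : Nat :=
  if SI.contains v then m1 ||| (1 <<< SI.getD v 0) else m1

-- dp[v][next_mask] += count, with the defaultdict defaults
def pvAWrite (dp : PySem.Dict String (PySem.Dict Nat Int)) (v : String) (m' : Nat) (c : Int) :
    PySem.Dict String (PySem.Dict Nat Int) :=
  dp.modify v PySem.Dict.empty (fun inner => inner.modify m' 0 (· + c))

-- the body of 'for u in topo'
def pvAStep (g : PySem.Dict String (List String)) (SI : PySem.Dict String Nat)
    (dp : PySem.Dict String (PySem.Dict Nat Int)) (u : String) :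
    PySem.Dict String (PySem.Dict Nat Int) :=
  ((dp.getD u PySem.Dict.empty).items).foldl
    (fun dp mc =>
      (pvAdj g u).foldl (fun dp v => pvAWrite dp v (pvNextMask SI mc.1 v) mc.2) dp)
    dp

def get_nb_paths_with_stops (graph : List (String × List String)) (s : String) (t : String) (stops : List String) : Int :=
  let graphD : PySem.Dict String (List String) := PySem.Dict.ofList graph
  let stopsS : PySem.Set String := PySem.Set.ofList stops
  let stop_idx := pvStopIdx stopsS
  let full_mask : Nat := (1 <<< stopsS.length) - 1
  let topo := pvTopologicalSort graphD
  let dp := topo.foldl (pvAStep graphD stop_idx) (pvDP0 stopsS s)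
  (dp.getD t PySem.Dict.empty).getD full_mask 0

-- ===== PORT B =====
-- _subsets(xs)
def pvSubsets : List String → List (List String)
  | [] => [[]]
  | x :: r => pvSubsets r ++ (pvSubsets r).map (fun ys => x :: ys)

-- body of 'for u in topo' in _count_paths_avoiding
def pvBStep (g : PySem.Dict String (List String)) (excluded : PySem.Set String)
    (cnt : PySem.Dict String Int) (u : String) : PySem.Dict String Int :=
  let c := cnt.getD u 0
  (pvAdj g u).foldl
    (fun cnt v => if PySem.Set.contains excluded v then cnt else cnt.modify v 0 (· + c))
    cnt

def pvCountPathsAvoiding (g : PySem.Dict String (List String)) (topo : List String)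
    (s t : String) (excluded : PySem.Set String) : Int :=
  if PySem.Set.contains excluded s then 0
  else ((topo.foldl (pvBStep g excluded) (PySem.Dict.empty.insert s 1)).getD t 0)

def get_nb_paths_with_stops_alt (graph : List (String × List String)) (s : String) (t : String) (stops : List String) : Int :=
  let graphD : PySem.Dict String (List String) := PySem.Dict.ofList graph
  let topo := pvTopologicalSort graphD
  (pvSubsets (PySem.Set.ofList stops)).foldl
    (fun total sub =>
      total + (-1 : Int) ^ sub.length * pvCountPathsAvoiding graphD topo s t (PySem.Set.ofList sub))
    0

-- ===== PRECONDITION & SPEC =====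
def Spec_get_nb_paths_with_stops (graph : List (String × List String)) (s : String) (t : String) (stops : List String) (out : Int) : Prop := out = get_nb_paths_with_stops_alt graph s t stops
instance (graph : List (String × List String)) (s : String) (t : String) (stops : List String) (out : Int) : Decidable (Spec_get_nb_paths_with_stops graph s t stops out) := by unfold Spec_get_nb_paths_with_stops; infer_instance

-- ===== CLAIM (what is proved, stated in full; the proofs are below) =====
def Claim_equal_get_nb_paths_with_stops : Prop := ∀ (graph : List (String × List String)) (s : String) (t : String) (stops : List String), Dom_get_nb_paths_with_stops graph s t stops → Spec_get_nb_paths_with_stops graph s t stops (get_nb_paths_with_stops graph s t stops)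

-- ===== LEMMAS AND PROOFS =====

-- proof-side notions -------------------------------------------------------

-- dp[v] with the defaultdict default
def pvInner (dp : PySem.Dict String (PySem.Dict Nat Int)) (v : String) : PySem.Dict Nat Int :=
  dp.getD v PySem.Dict.empty

-- sum of the masses on masks below 2^k that avoid the bits of S
def pvSF (N S : Nat) (d : PySem.Dict Nat Int) : Int :=
  ∑ m ∈ Finset.range N, (if m &&& S = 0 then d.getD m 0 else 0)

-- the OR of the bits of the nodes of Sl
def pvMaskOf (L : PySem.Set String) : List String → Nat
  | [] => 0
  | v :: r => (1 <<< (pvStopIdx L).getD v 0) ||| pvMaskOf L r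

-- structural invariant of A's dp: inner keys distinct and < 2^k, and every mass
-- sits on a mask m with m &&& im = im (the initial mask is contained in it)
def pvGood (k im : Nat) (dp : PySem.Dict String (PySem.Dict Nat Int)) : Prop :=
  ∀ v, (pvInner dp v).keys.Nodup ∧ (∀ m ∈ (pvInner dp v).keys, m < 2 ^ k) ∧
    (∀ m, m &&& im ≠ im → (pvInner dp v).getD m 0 = 0)

-- B's counter at v equals the mass of A's dp at v on masks avoiding Sl's bits
def pvInvt (k : Nat) (L : PySem.Set String) (Sl : List String)
    (dp : PySem.Dict String (PySem.Dict Nat Int)) (cnt : PySem.Dict String Int) : Prop :=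
  ∀ v0, cnt.getD v0 0 = pvSF (2 ^ k) (pvMaskOf L Sl) (pvInner dp v0)

def pvItemsSum (S : Nat) (I : List (Nat × Int)) : Int :=
  (I.map (fun mc => if mc.1 &&& S = 0 then mc.2 else 0)).sum

-- generic bit facts --------------------------------------------------------

lemma pv_or_eq_zero (x y : Nat) : x ||| y = 0 ↔ x = 0 ∧ y = 0 := by
  constructor
  · intro h
    have h' : ∀ i, (x.testBit i || y.testBit i) = false := by
      intro i
      have := congrArg (fun z => Nat.testBit z i) h
      simpa [Nat.testBit_or, Nat.zero_testBit] using this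
    exact ⟨Nat.eq_of_testBit_eq fun i => by
        have := h' i; simp only [Bool.or_eq_false_iff] at this
        simp [this.1, Nat.zero_testBit],
      Nat.eq_of_testBit_eq fun i => by
        have := h' i; simp only [Bool.or_eq_false_iff] at this
        simp [this.2, Nat.zero_testBit]⟩
  · rintro ⟨rfl, rfl⟩; rfl

lemma pv_or_and_zero (x y z : Nat) : (x ||| y) &&& z = 0 ↔ x &&& z = 0 ∧ y &&& z = 0 := by
  rw [Nat.and_or_distrib_right, pv_or_eq_zero]

lemma pv_two_pow_and_eq_zero (i x : Nat) : 2 ^ i &&& x = 0 ↔ x.testBit i = false := by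
  rw [Nat.two_pow_and]
  cases h : x.testBit i
  · simp
  · simp

lemma pv_and_self_ne (m im : Nat) (h : m &&& im ≠ im) : m ≠ im := by
  intro heq; subst heq; exact h (Nat.and_self m)

lemma pv_im_and_mono (m1 b im : Nat) (h : m1 &&& im = im) : (m1 ||| b) &&& im = im := by
  rw [Nat.and_or_distrib_right, h]
  apply Nat.eq_of_testBit_eq
  intro i
  simp only [Nat.testBit_or, Nat.testBit_and]
  cases hb : b.testBit i <;> cases hm : im.testBit i <;> rfl

-- stop_idx -----------------------------------------------------------------

lemma pvStopIdx_aux (v : String) :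
    ∀ (l : List String) (d : PySem.Dict String Nat) (n : Nat), l.Nodup →
      ((l.foldl (fun (p : PySem.Dict String Nat × Nat) u => (p.1.insert u p.2, p.2 + 1)) (d, n)).1).get? v
        = if v ∈ l then some (n + l.idxOf v) else d.get? v := by
  intro l
  induction l with
  | nil => intro d n _; simp
  | cons x xs ih =>
    intro d n hnd
    rw [List.nodup_cons] at hnd
    rw [List.foldl_cons, ih _ _ hnd.2]
    by_cases hvx : v = x
    · subst hvx
      rw [if_neg (fun h => hnd.1 h), if_pos (List.mem_cons_self ..)]
      rw [PySem.Dict.get?_insert_self, List.idxOf_cons_self]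
      simp
    · rw [PySem.Dict.get?_insert_of_ne _ _ hvx]
      by_cases hm : v ∈ xs
      · rw [if_pos hm, if_pos (List.mem_cons_of_mem _ hm), List.idxOf_cons_ne _ (Ne.symm hvx)]
        congr 1
        omega
      · rw [if_neg hm, if_neg (by simp [hvx, hm])]

lemma pvStopIdx_get? (L : PySem.Set String) (hL : L.Nodup) (v : String) :
    (pvStopIdx L).get? v = if v ∈ L then some (L.idxOf v) else none := by
  unfold pvStopIdx
  rw [pvStopIdx_aux v L PySem.Dict.empty 0 hL]
  simp [PySem.Dict.get?_empty]

lemma pvStopIdx_contains (L : PySem.Set String) (hL : L.Nodup) (v : String) :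
    (pvStopIdx L).contains v = decide (v ∈ L) := by
  rw [PySem.Dict.contains_eq_isSome_get?, pvStopIdx_get? L hL v]
  by_cases h : v ∈ L <;> simp [h]

lemma pvStopIdx_getD (L : PySem.Set String) (hL : L.Nodup) (v : String) (hv : v ∈ L) :
    (pvStopIdx L).getD v 0 = L.idxOf v := by
  rw [PySem.Dict.getD_eq_get?_getD, pvStopIdx_get? L hL v, if_pos hv]
  rfl

lemma pvBit_eq (L : PySem.Set String) (hL : L.Nodup) (v : String) (hv : v ∈ L) :
    1 <<< (pvStopIdx L).getD v 0 = 2 ^ L.idxOf v := by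
  rw [pvStopIdx_getD L hL v hv, Nat.one_shiftLeft]

lemma pvBit_lt (L : PySem.Set String) (hL : L.Nodup) (v : String) (hv : v ∈ L) :
    1 <<< (pvStopIdx L).getD v 0 < 2 ^ L.length := by
  rw [pvBit_eq L hL v hv]
  exact Nat.pow_lt_pow_right (by norm_num) (List.idxOf_lt_length_of_mem hv)

lemma pvMask_testBit (L : PySem.Set String) (hL : L.Nodup) :
    ∀ (Sl : List String), (∀ x ∈ Sl, x ∈ L) → ∀ i,
      ((pvMaskOf L Sl).testBit i = true ↔ ∃ v ∈ Sl, L.idxOf v = i) := by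
  intro Sl
  induction Sl with
  | nil => intro _ i; simp [pvMaskOf, Nat.zero_testBit]
  | cons v r ih =>
    intro hsub i
    have hv : v ∈ L := hsub v (List.mem_cons_self ..)
    simp only [pvMaskOf, Nat.testBit_or, pvBit_eq L hL v hv, Nat.testBit_two_pow]
    rw [Bool.or_eq_true]
    constructor
    · rintro (h | h)
      · exact ⟨v, List.mem_cons_self .., by simpa using h⟩
      · obtain ⟨w, hw, hwi⟩ := (ih (fun x hx => hsub x (List.mem_cons_of_mem _ hx)) i).mp h
        exact ⟨w, List.mem_cons_of_mem _ hw, hwi⟩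
    · rintro ⟨w, hw, hwi⟩
      rcases List.mem_cons.mp hw with rfl | hw'
      · left; simpa using hwi
      · right
        exact (ih (fun x hx => hsub x (List.mem_cons_of_mem _ hx)) i).mpr ⟨w, hw', hwi⟩

lemma pvBit_and_maskOf (L : PySem.Set String) (hL : L.Nodup) (v : String) (hv : v ∈ L)
    (Sl : List String) (hsub : ∀ x ∈ Sl, x ∈ L) :
    ((1 <<< (pvStopIdx L).getD v 0) &&& pvMaskOf L Sl = 0 ↔ v ∉ Sl) := by
  rw [pvBit_eq L hL v hv, pv_two_pow_and_eq_zero]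
  constructor
  · intro h hvSl
    have : (pvMaskOf L Sl).testBit (L.idxOf v) = true :=
      (pvMask_testBit L hL Sl hsub (L.idxOf v)).mpr ⟨v, hvSl, rfl⟩
    rw [h] at this
    exact Bool.false_ne_true this
  · intro hvSl
    by_contra hne
    have htrue : (pvMaskOf L Sl).testBit (L.idxOf v) = true := by
      cases h : (pvMaskOf L Sl).testBit (L.idxOf v)
      · exact absurd h hne
      · rfl
    obtain ⟨w, hwSl, hwi⟩ := (pvMask_testBit L hL Sl hsub (L.idxOf v)).mp htrue
    have hwv : w = v := by
      have h1 : L[L.idxOf w]'(List.idxOf_lt_length_of_mem (hsub w hwSl)) = w :=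
        List.getElem_idxOf _
      have h2 : L[L.idxOf v]'(List.idxOf_lt_length_of_mem hv) = v :=
        List.getElem_idxOf _
      rw [← h1, ← h2]
      congr 1
    subst hwv
    exact hvSl hwSl

-- pvSF ----------------------------------------------------------------------

lemma pvSF_point (N S : Nat) (d d' : PySem.Dict Nat Int) (m0 : Nat) (c : Int)
    (h : ∀ m, d'.getD m 0 = d.getD m 0 + (if m = m0 then c else 0)) :
    pvSF N S d' = pvSF N S d + (if m0 < N ∧ m0 &&& S = 0 then c else 0) := by
  unfold pvSF
  have hcongr : ∀ m ∈ Finset.range N,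
      (if m &&& S = 0 then d'.getD m 0 else 0)
        = (if m &&& S = 0 then d.getD m 0 else 0) + (if m = m0 then (if m &&& S = 0 then c else 0) else 0) := by
    intro m _
    rw [h m]
    by_cases h2 : m = m0
    · subst h2; split_ifs <;> ring
    · simp [h2]
  rw [Finset.sum_congr rfl hcongr, Finset.sum_add_distrib,
    Finset.sum_ite_eq' (Finset.range N) m0 (fun m => if m &&& S = 0 then c else 0)]
  congr 1
  by_cases h1 : m0 < N <;> by_cases h2 : m0 &&& S = 0 <;> simp [h1, h2, Finset.mem_range]

lemma pvSF_empty (N S : Nat) : pvSF N S PySem.Dict.empty = 0 := by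
  unfold pvSF
  apply Finset.sum_eq_zero
  intro m _
  simp [PySem.Dict.getD_empty]

lemma pvItemsSum_eq_SF (N S : Nat) :
    ∀ (I : List (Nat × Int)), (I.map Prod.fst).Nodup → (∀ m ∈ I.map Prod.fst, m < N) →
      pvItemsSum S I = pvSF N S (PySem.Dict.mk I) := by
  intro I
  induction I with
  | nil =>
    intro _ _
    show (0 : Int) = pvSF N S PySem.Dict.empty
    rw [pvSF_empty]
  | cons p I' ih =>
    intro hnd hbd
    simp only [List.map_cons, List.nodup_cons] at hnd
    have hp1 : p.1 < N := hbd p.1 (by simp)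
    have hstep : pvSF N S (PySem.Dict.mk (p :: I')) = pvSF N S (PySem.Dict.mk I')
        + (if p.1 < N ∧ p.1 &&& S = 0 then p.2 else 0) := by
      apply pvSF_point
      intro m
      rw [PySem.Dict.getD_eq_get?_getD, PySem.Dict.getD_eq_get?_getD, PySem.Dict.get?_mk_cons]
      by_cases hm : p.1 = m
      · subst hm
        have hnone : (PySem.Dict.mk I').get? p.1 = none := by
          rw [PySem.Dict.get?_eq_none_iff_not_mem_keys]
          exact hnd.1
        simp [hnone]
      · simp [hm, Ne.symm hm]
    rw [hstep, ← ih hnd.2 (fun m hm => hbd m (by simp [hm]))]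
    unfold pvItemsSum
    simp only [List.map_cons, List.sum_cons, hp1, true_and]
    ring

-- single A write ------------------------------------------------------------

lemma pvInner_write (dp : PySem.Dict String (PySem.Dict Nat Int)) (v : String) (m' : Nat)
    (c : Int) (v0 : String) :
    pvInner (pvAWrite dp v m' c) v0
      = if v0 = v then (pvInner dp v).modify m' 0 (· + c) else pvInner dp v0 := by
  unfold pvAWrite pvInner
  rw [PySem.Dict.getD_modify]

lemma pvGetD_write (dp : PySem.Dict String (PySem.Dict Nat Int)) (v : String) (m' : Nat)
    (c : Int) (v0 : String) (m : Nat) :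
    (pvInner (pvAWrite dp v m' c) v0).getD m 0
      = (pvInner dp v0).getD m 0 + (if v0 = v ∧ m = m' then c else 0) := by
  rw [pvInner_write]
  by_cases h1 : v0 = v
  · subst h1
    rw [if_pos rfl, PySem.Dict.getD_modify]
    by_cases h2 : m = m' <;> simp [h2]
  · simp [h1]

lemma pvSF_write (N S : Nat) (dp : PySem.Dict String (PySem.Dict Nat Int)) (v : String)
    (m' : Nat) (c : Int) (v0 : String) :
    pvSF N S (pvInner (pvAWrite dp v m' c) v0)
      = pvSF N S (pvInner dp v0) + (if v0 = v ∧ m' < N ∧ m' &&& S = 0 then c else 0) := by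
  have h := pvSF_point N S (pvInner dp v0) (pvInner (pvAWrite dp v m' c) v0) m'
    (if v0 = v then c else 0)
    (fun m => by
      rw [pvGetD_write]
      by_cases h1 : v0 = v <;> by_cases h2 : m = m' <;> simp [h1, h2])
  rw [h]
  congr 1
  by_cases h1 : v0 = v <;> by_cases h2 : m' < N ∧ m' &&& S = 0 <;> simp [h1, h2]

-- A-side folds ---------------------------------------------------------------

lemma pvA_adj_SF (N S : Nat) (SI : PySem.Dict String Nat) (adj : List String) :
    ∀ (dp : PySem.Dict String (PySem.Dict Nat Int)) (m1 : Nat) (c : Int) (v0 : String),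
      pvSF N S (pvInner (adj.foldl (fun dp v => pvAWrite dp v (pvNextMask SI m1 v) c) dp) v0)
        = pvSF N S (pvInner dp v0)
          + ((adj.countP (fun v => decide (v = v0 ∧ pvNextMask SI m1 v < N ∧ pvNextMask SI m1 v &&& S = 0)) : Int)) * c := by
  induction adj with
  | nil => intro dp m1 c v0; simp
  | cons v adj ih =>
    intro dp m1 c v0
    rw [List.foldl_cons, ih, pvSF_write, List.countP_cons]
    by_cases h1 : v = v0
    · subst h1
      by_cases h2 : pvNextMask SI m1 v < N ∧ pvNextMask SI m1 v &&& S = 0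
      · simp only [h2, and_self, decide_true]
        push_cast
        ring
      · have : ¬(v = v ∧ pvNextMask SI m1 v < N ∧ pvNextMask SI m1 v &&& S = 0) := by
          intro hcon; exact h2 hcon.2
        simp [h2]
    · have : ¬(v = v0 ∧ pvNextMask SI m1 v < N ∧ pvNextMask SI m1 v &&& S = 0) := by
        intro hcon; exact h1 hcon.1
      simp only [this, decide_false]
      have hne : ¬(v0 = v ∧ pvNextMask SI m1 v < N ∧ pvNextMask SI m1 v &&& S = 0) := by
        intro hcon; exact h1 hcon.1.symm
      simp [hne]

lemma pvA_items_SF (N S : Nat) (SI : PySem.Dict String Nat) (g : PySem.Dict String (List String)) (u : String) :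
    ∀ (I : List (Nat × Int)) (dp : PySem.Dict String (PySem.Dict Nat Int)) (v0 : String),
      pvSF N S (pvInner (I.foldl (fun dp mc => (pvAdj g u).foldl (fun dp v => pvAWrite dp v (pvNextMask SI mc.1 v) mc.2) dp) dp) v0)
        = pvSF N S (pvInner dp v0)
          + (I.map (fun mc => ((pvAdj g u).countP (fun v => decide (v = v0 ∧ pvNextMask SI mc.1 v < N ∧ pvNextMask SI mc.1 v &&& S = 0)) : Int) * mc.2)).sum := by
  intro I
  induction I with
  | nil => intro dp v0; simp
  | cons mc I' ih =>
    intro dp v0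
    rw [List.foldl_cons, ih, pvA_adj_SF]
    simp only [List.map_cons, List.sum_cons]
    ring

lemma pvCountP_eq (adj : List String) (v0 : String) (Q : String → Prop) [DecidablePred Q] :
    adj.countP (fun v => decide (v = v0 ∧ Q v)) = if Q v0 then adj.count v0 else 0 := by
  induction adj with
  | nil => simp
  | cons a l ih =>
    rw [List.countP_cons, ih, List.count_cons]
    by_cases ha : a = v0
    · subst ha
      by_cases hq : Q a <;> simp [hq]
    · have hna : ¬(a = v0 ∧ Q a) := fun h => ha h.1
      simp [ha]

lemma pvNext_cond (L : PySem.Set String) (hL : L.Nodup) (Sl : List String) (hsub : Sl.Sublist L)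
    (m1 : Nat) (h1 : m1 < 2 ^ L.length) (v0 : String) :
    (pvNextMask (pvStopIdx L) m1 v0 < 2 ^ L.length ∧ pvNextMask (pvStopIdx L) m1 v0 &&& pvMaskOf L Sl = 0)
      ↔ (m1 &&& pvMaskOf L Sl = 0 ∧ v0 ∉ Sl) := by
  have hsub' : ∀ x ∈ Sl, x ∈ L := fun x hx => hsub.subset hx
  unfold pvNextMask
  by_cases hc : (pvStopIdx L).contains v0
  · have hv0 : v0 ∈ L := by
      rw [pvStopIdx_contains L hL v0] at hc
      exact of_decide_eq_true hc
    rw [if_pos hc]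
    constructor
    · rintro ⟨_, h0⟩
      rw [pv_or_and_zero] at h0
      exact ⟨h0.1, (pvBit_and_maskOf L hL v0 hv0 Sl hsub').mp h0.2⟩
    · rintro ⟨hm1c, hv0S⟩
      refine ⟨Nat.or_lt_two_pow h1 (pvBit_lt L hL v0 hv0), ?_⟩
      rw [pv_or_and_zero]
      exact ⟨hm1c, (pvBit_and_maskOf L hL v0 hv0 Sl hsub').mpr hv0S⟩
  · have hv0 : v0 ∉ L := by
      rw [pvStopIdx_contains L hL v0] at hc
      simpa using hc
    have hv0S : v0 ∉ Sl := fun h => hv0 (hsub' v0 h)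
    rw [if_neg hc]
    simp [h1, hv0S]

-- Good preservation ----------------------------------------------------------

lemma pvGood_write (k im : Nat) (dp : PySem.Dict String (PySem.Dict Nat Int)) (v : String)
    (m' : Nat) (c : Int) (hg : pvGood k im dp) (hm : m' < 2 ^ k)
    (hc : m' &&& im ≠ im → c = 0) : pvGood k im (pvAWrite dp v m' c) := by
  intro v0
  obtain ⟨hnd0, hbd0, hP0⟩ := hg v0
  rw [pvInner_write]
  by_cases h1 : v0 = v
  · subst h1
    rw [if_pos rfl]
    have hkeys : ((pvInner dp v0).modify m' 0 (· + c)).keys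
        = ((pvInner dp v0).insert m' ((pvInner dp v0).getD m' 0 + c)).keys :=
      PySem.Dict.keys_modify _ _ _ _
    have hP' : ∀ m, m &&& im ≠ im → ((pvInner dp v0).modify m' 0 (· + c)).getD m 0 = 0 := by
      intro m hmne
      rw [PySem.Dict.getD_modify]
      by_cases h2 : m = m'
      · subst h2
        rw [if_pos rfl, hP0 _ hmne, hc hmne, add_zero]
      · rw [if_neg h2]; exact hP0 m hmne
    by_cases hcon : (pvInner dp v0).contains m'
    · rw [hkeys, PySem.Dict.keys_insert_of_contains _ _ hcon]
      exact ⟨hnd0, hbd0, hP'⟩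
    · have hnotmem : m' ∉ (pvInner dp v0).keys := by
        intro hmem
        rw [← PySem.Dict.contains_iff_mem_keys] at hmem
        exact absurd hmem (by simp [hcon])
      rw [hkeys, PySem.Dict.keys_insert_of_not_contains _ _ (by simpa using hcon)]
      refine ⟨?_, ?_, hP'⟩
      · simp only [List.nodup_append, hnd0, true_and]
        refine ⟨List.nodup_singleton _, ?_⟩
        intro a ha b hb
        simp only [List.mem_singleton] at hb
        subst hb
        exact fun h => hnotmem (h ▸ ha)
      · intro m hmem
        rcases List.mem_append.mp hmem with h | h
        · exact hbd0 m h
        · simp at h; omega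
  · rw [if_neg h1]
    exact ⟨hnd0, hbd0, hP0⟩

lemma pvGood_step (k im : Nat) (SI : PySem.Dict String Nat) (g : PySem.Dict String (List String))
    (u : String) (hbit : ∀ v, SI.contains v = true → 1 <<< SI.getD v 0 < 2 ^ k)
    (dp : PySem.Dict String (PySem.Dict Nat Int)) (hg : pvGood k im dp) :
    pvGood k im (pvAStep g SI dp u) := by
  unfold pvAStep
  obtain ⟨hndu, hbdu, hPu⟩ := hg u
  have hI : ∀ mc ∈ (pvInner dp u).items, mc.1 < 2 ^ k ∧ (mc.1 &&& im ≠ im → mc.2 = 0) := by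
    intro mc hmc
    have hkey : mc.1 ∈ (pvInner dp u).keys := by
      show mc.1 ∈ (pvInner dp u).items.map Prod.fst
      exact List.mem_map_of_mem hmc
    refine ⟨hbdu mc.1 hkey, fun hne => ?_⟩
    have hval := PySem.Dict.getD_of_mem_items (pvInner dp u) (k := mc.1) (v := mc.2) hmc hndu 0
    rw [← hval]
    exact hPu mc.1 hne
  show pvGood k im (List.foldl _ dp (pvInner dp u).items)
  generalize (pvInner dp u).items = I at hI
  clear hndu hbdu hPu
  induction I generalizing dp with
  | nil => exact hg
  | cons mc I' ihI =>
    rw [List.foldl_cons]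
    apply ihI _ ?_ (fun mc' hmc' => hI mc' (List.mem_cons_of_mem _ hmc'))
    obtain ⟨hmc1, hmc2⟩ := hI mc (List.mem_cons_self ..)
    have hadj : ∀ (adj : List String) dp', pvGood k im dp' →
        pvGood k im (adj.foldl (fun dp v => pvAWrite dp v (pvNextMask SI mc.1 v) mc.2) dp') := by
      intro adj
      induction adj with
      | nil => intro dp' h; exact h
      | cons v adj ihadj =>
        intro dp' h
        rw [List.foldl_cons]
        apply ihadj
        apply pvGood_write k im dp' v _ _ h
        · unfold pvNextMask
          by_cases hcv : SI.contains v
          · rw [if_pos hcv]; exact Nat.or_lt_two_pow hmc1 (hbit v hcv)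
          · rw [if_neg hcv]; exact hmc1
        · intro hne
          apply hmc2
          intro heq
          apply hne
          unfold pvNextMask
          by_cases hcv : SI.contains v
          · rw [if_pos hcv]; exact pv_im_and_mono _ _ _ heq
          · rw [if_neg hcv]; exact heq
    exact hadj (pvAdj g u) dp hg

-- B-side fold ----------------------------------------------------------------

lemma pvB_adj (excl : PySem.Set String) (adj : List String) :
    ∀ (cnt : PySem.Dict String Int) (c : Int) (v0 : String),
      (adj.foldl (fun cnt v => if PySem.Set.contains excl v then cnt else cnt.modify v 0 (· + c)) cnt).getD v0 0
        = cnt.getD v0 0 + (if PySem.Set.contains excl v0 then 0 else (adj.count v0 : Int) * c) := by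
  induction adj with
  | nil => intro cnt c v0; by_cases h : PySem.Set.contains excl v0 = true <;> simp
  | cons v adj ih =>
    intro cnt c v0
    rw [List.foldl_cons]
    by_cases he : PySem.Set.contains excl v = true
    · rw [if_pos he, ih]
      by_cases h0 : PySem.Set.contains excl v0 = true
      · rw [if_pos h0, if_pos h0]
      · have hvne : v ≠ v0 := fun h => h0 (h ▸ he)
        have hcnt : List.count v0 (v :: adj) = List.count v0 adj := by
          simp [hvne]
        rw [if_neg h0, if_neg h0, hcnt]
    · rw [if_neg he, ih]
      by_cases h1 : v = v0
      · subst h1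
        have hgd : (cnt.modify v 0 (· + c)).getD v 0 = cnt.getD v 0 + c := by
          rw [PySem.Dict.getD_modify, if_pos rfl]
        have hcnt : List.count v (v :: adj) = List.count v adj + 1 := by
          simp
        rw [hgd, hcnt, if_neg he, if_neg he]
        push_cast
        ring
      · have hgd : (cnt.modify v 0 (· + c)).getD v0 0 = cnt.getD v0 0 := by
          rw [PySem.Dict.getD_modify, if_neg (fun h => h1 h.symm)]
        have hcnt : List.count v0 (v :: adj) = List.count v0 adj := by
          simp [h1]
        rw [hgd, hcnt]

-- one step preserves the invariant -------------------------------------------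

lemma pvStep_pres (L : PySem.Set String) (hL : L.Nodup) (Sl : List String) (hsub : Sl.Sublist L)
    (g : PySem.Dict String (List String)) (u : String)
    (dp : PySem.Dict String (PySem.Dict Nat Int)) (cnt : PySem.Dict String Int)
    (hg : pvGood L.length (pvInitMask L s') dp) (hinv : pvInvt L.length L Sl dp cnt) :
    pvInvt L.length L Sl (pvAStep g (pvStopIdx L) dp u) (pvBStep g (PySem.Set.ofList Sl) cnt u) := by
  intro v0
  obtain ⟨hndu, hbdu, _⟩ := hg u
  have hBB : (pvBStep g (PySem.Set.ofList Sl) cnt u).getD v0 0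
      = cnt.getD v0 0 + (if PySem.Set.contains (PySem.Set.ofList Sl) v0 then 0
          else ((pvAdj g u).count v0 : Int) * cnt.getD u 0) := by
    unfold pvBStep
    exact pvB_adj (PySem.Set.ofList Sl) (pvAdj g u) cnt (cnt.getD u 0) v0
  have hAA := pvA_items_SF (2 ^ L.length) (pvMaskOf L Sl) (pvStopIdx L) g u
    ((dp.getD u PySem.Dict.empty).items) dp v0
  have hstep : pvSF (2 ^ L.length) (pvMaskOf L Sl) (pvInner (pvAStep g (pvStopIdx L) dp u) v0)
      = pvSF (2 ^ L.length) (pvMaskOf L Sl) (pvInner dp v0)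
        + (((dp.getD u PySem.Dict.empty).items).map
            (fun mc => ((pvAdj g u).countP (fun v => decide (v = v0 ∧ pvNextMask (pvStopIdx L) mc.1 v < 2 ^ L.length ∧ pvNextMask (pvStopIdx L) mc.1 v &&& pvMaskOf L Sl = 0)) : Int) * mc.2)).sum := by
    unfold pvAStep
    exact hAA
  have hkeysI : ∀ mc ∈ (dp.getD u PySem.Dict.empty).items, mc.1 < 2 ^ L.length := by
    intro mc hmc
    apply hbdu
    show mc.1 ∈ (dp.getD u PySem.Dict.empty).items.map Prod.fst
    exact List.mem_map_of_mem hmc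
  have hcontains : PySem.Set.contains (PySem.Set.ofList Sl) v0 = true ↔ v0 ∈ Sl := by
    rw [PySem.Set.contains_iff]
    exact PySem.Set.mem_ofList Sl v0
  by_cases hv0 : v0 ∈ Sl
  · -- every contribution dies on both sides
    have hzero : (((dp.getD u PySem.Dict.empty).items).map
        (fun mc => ((pvAdj g u).countP (fun v => decide (v = v0 ∧ pvNextMask (pvStopIdx L) mc.1 v < 2 ^ L.length ∧ pvNextMask (pvStopIdx L) mc.1 v &&& pvMaskOf L Sl = 0)) : Int) * mc.2)).sum = 0 := by
      apply List.sum_eq_zero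
      intro x hx
      obtain ⟨mc, hmc, hxeq⟩ := List.mem_map.mp hx
      rw [← hxeq, pvCountP_eq (pvAdj g u) v0
        (fun v => pvNextMask (pvStopIdx L) mc.1 v < 2 ^ L.length ∧ pvNextMask (pvStopIdx L) mc.1 v &&& pvMaskOf L Sl = 0)]
      rw [if_neg (fun hq => ((pvNext_cond L hL Sl hsub mc.1 (hkeysI mc hmc) v0).mp hq).2 hv0)]
      simp
    rw [hBB, if_pos (hcontains.mpr hv0), hstep, hzero, add_zero, add_zero]
    exact hinv v0
  · have hterm : ∀ mc ∈ (dp.getD u PySem.Dict.empty).items,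
        ((pvAdj g u).countP (fun v => decide (v = v0 ∧ pvNextMask (pvStopIdx L) mc.1 v < 2 ^ L.length ∧ pvNextMask (pvStopIdx L) mc.1 v &&& pvMaskOf L Sl = 0)) : Int) * mc.2
          = ((pvAdj g u).count v0 : Int) * (if mc.1 &&& pvMaskOf L Sl = 0 then mc.2 else 0) := by
      intro mc hmc
      rw [pvCountP_eq (pvAdj g u) v0
        (fun v => pvNextMask (pvStopIdx L) mc.1 v < 2 ^ L.length ∧ pvNextMask (pvStopIdx L) mc.1 v &&& pvMaskOf L Sl = 0)]
      by_cases hmcS : mc.1 &&& pvMaskOf L Sl = 0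
      · rw [if_pos ((pvNext_cond L hL Sl hsub mc.1 (hkeysI mc hmc) v0).mpr ⟨hmcS, hv0⟩), if_pos hmcS]
      · rw [if_neg (fun hq => hmcS ((pvNext_cond L hL Sl hsub mc.1 (hkeysI mc hmc) v0).mp hq).1), if_neg hmcS]
        simp
    have hsum : (((dp.getD u PySem.Dict.empty).items).map
        (fun mc => ((pvAdj g u).countP (fun v => decide (v = v0 ∧ pvNextMask (pvStopIdx L) mc.1 v < 2 ^ L.length ∧ pvNextMask (pvStopIdx L) mc.1 v &&& pvMaskOf L Sl = 0)) : Int) * mc.2)).sum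
          = ((pvAdj g u).count v0 : Int) * pvItemsSum (pvMaskOf L Sl) (dp.getD u PySem.Dict.empty).items := by
      rw [List.map_congr_left hterm]
      unfold pvItemsSum
      exact List.sum_map_mul_left _ _ _
    have hbridge : pvItemsSum (pvMaskOf L Sl) (dp.getD u PySem.Dict.empty).items
        = pvSF (2 ^ L.length) (pvMaskOf L Sl) (pvInner dp u) := by
      have heta : PySem.Dict.mk (dp.getD u PySem.Dict.empty).items = pvInner dp u := rfl
      rw [pvItemsSum_eq_SF (2 ^ L.length) (pvMaskOf L Sl) (dp.getD u PySem.Dict.empty).items hndu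
        (fun m hm => hbdu m hm), heta]
    rw [hBB, if_neg (fun h => hv0 (hcontains.mp h)), hstep, hsum, hbridge,
      hinv v0, hinv u]

-- along the whole topo order --------------------------------------------------

lemma pvTopo_good (k im : Nat) (SI : PySem.Dict String Nat) (g : PySem.Dict String (List String))
    (hbit : ∀ v, SI.contains v = true → 1 <<< SI.getD v 0 < 2 ^ k) :
    ∀ (topo : List String) (dp : PySem.Dict String (PySem.Dict Nat Int)), pvGood k im dp →
      pvGood k im (topo.foldl (pvAStep g SI) dp) := by
  intro topo
  induction topo with
  | nil => intro dp h; exact h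
  | cons u rest ih =>
    intro dp h
    rw [List.foldl_cons]
    exact ih _ (pvGood_step k im SI g u hbit dp h)

lemma pvTopo_pres (L : PySem.Set String) (hL : L.Nodup) (Sl : List String) (hsub : Sl.Sublist L)
    (g : PySem.Dict String (List String)) (s' : String) :
    ∀ (topo : List String) (dp : PySem.Dict String (PySem.Dict Nat Int)) (cnt : PySem.Dict String Int),
      pvGood L.length (pvInitMask L s') dp → pvInvt L.length L Sl dp cnt →
      pvInvt L.length L Sl (topo.foldl (pvAStep g (pvStopIdx L)) dp) (topo.foldl (pvBStep g (PySem.Set.ofList Sl)) cnt) := by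
  have hbit : ∀ v, (pvStopIdx L).contains v = true → 1 <<< (pvStopIdx L).getD v 0 < 2 ^ L.length := by
    intro v hc
    rw [pvStopIdx_contains L hL] at hc
    exact pvBit_lt L hL v (of_decide_eq_true hc)
  intro topo
  induction topo with
  | nil => intro dp cnt _ hinv; exact hinv
  | cons u rest ih =>
    intro dp cnt hg hinv
    rw [List.foldl_cons, List.foldl_cons]
    exact ih _ _ (pvGood_step L.length (pvInitMask L s') (pvStopIdx L) g u hbit dp hg)
      (pvStep_pres L hL Sl hsub g u dp cnt hg hinv)

-- the initial state ------------------------------------------------------------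

lemma pvInner_DP0 (L : PySem.Set String) (s v0 : String) :
    pvInner (pvDP0 L s) v0
      = if v0 = s then PySem.Dict.empty.insert (pvInitMask L s) 1 else PySem.Dict.empty := by
  unfold pvDP0 pvInner
  rw [PySem.Dict.getD_modify]
  by_cases h : v0 = s <;> simp [h, PySem.Dict.getD_empty]

lemma pvInitMask_lt (L : PySem.Set String) (hL : L.Nodup) (s : String) :
    pvInitMask L s < 2 ^ L.length := by
  unfold pvInitMask
  by_cases h : PySem.Set.contains L s
  · rw [if_pos h, Nat.zero_or]
    exact pvBit_lt L hL s ((PySem.Set.contains_iff L s).mp h)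
  · rw [if_neg h]
    exact Nat.two_pow_pos _

lemma pvGood0 (L : PySem.Set String) (hL : L.Nodup) (s : String) :
    pvGood L.length (pvInitMask L s) (pvDP0 L s) := by
  intro v0
  rw [pvInner_DP0]
  by_cases h : v0 = s
  · rw [if_pos h]
    have hkeys : (PySem.Dict.empty.insert (pvInitMask L s) (1 : Int)).keys = [pvInitMask L s] := by
      rw [PySem.Dict.keys_insert_of_not_contains _ _ (PySem.Dict.contains_empty _), PySem.Dict.keys_empty]
      rfl
    refine ⟨by rw [hkeys]; exact List.nodup_singleton _, ?_, ?_⟩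
    · intro m hm
      rw [hkeys] at hm
      simp only [List.mem_singleton] at hm
      subst hm
      exact pvInitMask_lt L hL s
    · intro m hm
      rw [PySem.Dict.getD_insert]
      rw [if_neg (pv_and_self_ne m _ hm), PySem.Dict.getD_empty]
  · rw [if_neg h]
    refine ⟨by rw [PySem.Dict.keys_empty]; exact List.nodup_nil, ?_, ?_⟩
    · intro m hm
      rw [PySem.Dict.keys_empty] at hm
      exact absurd hm (List.not_mem_nil)
    · intro m _
      exact PySem.Dict.getD_empty _ _

lemma pvInv0 (L : PySem.Set String) (hL : L.Nodup) (Sl : List String) (hsub : Sl.Sublist L)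
    (s : String) (hs : s ∉ Sl) :
    pvInvt L.length L Sl (pvDP0 L s) (PySem.Dict.empty.insert s 1) := by
  intro v0
  rw [pvInner_DP0, PySem.Dict.getD_insert]
  by_cases h : v0 = s
  · rw [if_pos h, if_pos h]
    have hpoint : pvSF (2 ^ L.length) (pvMaskOf L Sl) (PySem.Dict.empty.insert (pvInitMask L s) 1)
        = pvSF (2 ^ L.length) (pvMaskOf L Sl) PySem.Dict.empty
          + (if pvInitMask L s < 2 ^ L.length ∧ pvInitMask L s &&& pvMaskOf L Sl = 0 then 1 else 0) := by
      apply pvSF_point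
      intro m
      rw [PySem.Dict.getD_insert, PySem.Dict.getD_empty]
      by_cases h2 : m = pvInitMask L s <;> simp [h2]
    rw [hpoint, pvSF_empty, zero_add]
    have hmask : pvInitMask L s &&& pvMaskOf L Sl = 0 := by
      unfold pvInitMask
      by_cases hc : PySem.Set.contains L s
      · rw [if_pos hc, Nat.zero_or]
        exact (pvBit_and_maskOf L hL s ((PySem.Set.contains_iff L s).mp hc) Sl
          (fun x hx => hsub.subset hx)).mpr hs
      · rw [if_neg hc]
        exact Nat.zero_and _
    rw [if_pos ⟨pvInitMask_lt L hL s, hmask⟩]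
  · rw [if_neg h, if_neg h, pvSF_empty]
    exact PySem.Dict.getD_empty _ _

-- the per-subset count equals the filtered mass of A's final dp ------------------

lemma pvCount_eq (L : PySem.Set String) (hL : L.Nodup) (Sl : List String) (hsub : Sl.Sublist L)
    (g : PySem.Dict String (List String)) (topo : List String) (s t : String) :
    pvCountPathsAvoiding g topo s t (PySem.Set.ofList Sl)
      = pvSF (2 ^ L.length) (pvMaskOf L Sl)
          (pvInner (topo.foldl (pvAStep g (pvStopIdx L)) (pvDP0 L s)) t) := by
  have hcont : PySem.Set.contains (PySem.Set.ofList Sl) s = true ↔ s ∈ Sl := by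
    rw [PySem.Set.contains_iff]
    exact PySem.Set.mem_ofList Sl s
  unfold pvCountPathsAvoiding
  by_cases hs : s ∈ Sl
  · rw [if_pos (hcont.mpr hs)]
    have hbit : ∀ v, (pvStopIdx L).contains v = true → 1 <<< (pvStopIdx L).getD v 0 < 2 ^ L.length := by
      intro v hc
      rw [pvStopIdx_contains L hL] at hc
      exact pvBit_lt L hL v (of_decide_eq_true hc)
    obtain ⟨_, _, hP⟩ := pvTopo_good L.length (pvInitMask L s) (pvStopIdx L) g hbit topo
      (pvDP0 L s) (pvGood0 L hL s) t
    symm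
    apply Finset.sum_eq_zero
    intro m _
    by_cases hcond : m &&& pvMaskOf L Sl = 0
    · rw [if_pos hcond]
      apply hP
      intro heq
      have hsL : s ∈ L := hsub.subset hs
      have him : pvInitMask L s = 2 ^ L.idxOf s := by
        unfold pvInitMask
        rw [if_pos ((PySem.Set.contains_iff L s).mpr hsL), Nat.zero_or, pvBit_eq L hL s hsL]
      rw [him] at heq
      have htb : m.testBit (L.idxOf s) = true := by
        rw [Nat.and_two_pow] at heq
        cases h : m.testBit (L.idxOf s)
        · exfalso
          rw [h] at heq
          simp only [Bool.toNat_false, Nat.zero_mul] at heq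
          exact (Nat.two_pow_pos (L.idxOf s)).ne' heq.symm
        · rfl
      have hmaskb : (pvMaskOf L Sl).testBit (L.idxOf s) = true :=
        (pvMask_testBit L hL Sl (fun x hx => hsub.subset hx) _).mpr ⟨s, hs, rfl⟩
      have hand : (m &&& pvMaskOf L Sl).testBit (L.idxOf s) = true := by
        rw [Nat.testBit_and, htb, hmaskb]
        rfl
      rw [hcond, Nat.zero_testBit] at hand
      exact Bool.false_ne_true hand
    · rw [if_neg hcond]
  · rw [if_neg (fun h => hs (hcont.mp h))]
    exact pvTopo_pres L hL Sl hsub g s topo _ _ (pvGood0 L hL s) (pvInv0 L hL Sl hsub s hs) t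

-- inclusion-exclusion ------------------------------------------------------------

lemma pvSubsets_mem_sublist : ∀ (L : List String) (Sl : List String), Sl ∈ pvSubsets L → Sl.Sublist L := by
  intro L
  induction L with
  | nil =>
    intro Sl h
    simp only [pvSubsets, List.mem_singleton] at h
    subst h
    exact List.Sublist.refl _
  | cons x r ih =>
    intro Sl h
    rcases List.mem_append.mp h with h | h
    · exact (ih Sl h).cons x
    · obtain ⟨ys, hys, rfl⟩ := List.mem_map.mp h
      exact (ih ys hys).cons₂ x

lemma pvSwap (r : Finset Nat) (l : List (List String)) (f : List String → Nat → Int) :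
    (l.map (fun x => ∑ m ∈ r, f x m)).sum = ∑ m ∈ r, (l.map (fun x => f x m)).sum := by
  induction l with
  | nil => simp
  | cons x l ih => simp only [List.map_cons, List.sum_cons, ih, Finset.sum_add_distrib]

lemma pvPIE_ind (L : PySem.Set String) :
    ∀ (L' : List String), L'.Sublist L → ∀ (m : Nat),
      ((pvSubsets L').map (fun Sl => (-1 : Int) ^ Sl.length * (if pvMaskOf L Sl &&& m = 0 then 1 else 0))).sum
        = if ∀ x ∈ L', (1 <<< (pvStopIdx L).getD x 0) &&& m ≠ 0 then 1 else 0 := by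
  intro L'
  induction L' with
  | nil =>
    intro _ m
    simp [pvSubsets, pvMaskOf, Nat.zero_and]
  | cons x r ih =>
    intro hsub m
    have hr : r.Sublist L := List.sublist_of_cons_sublist hsub
    show ((pvSubsets r ++ (pvSubsets r).map (fun ys => x :: ys)).map _).sum = _
    rw [List.map_append, List.sum_append, List.map_map]
    by_cases hb : (1 <<< (pvStopIdx L).getD x 0) &&& m = 0
    · have h2 : ((pvSubsets r).map ((fun Sl => (-1 : Int) ^ Sl.length * (if pvMaskOf L Sl &&& m = 0 then 1 else 0)) ∘ (fun ys => x :: ys)))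
          = ((pvSubsets r).map (fun ys => (-1 : Int) * ((-1 : Int) ^ ys.length * (if pvMaskOf L ys &&& m = 0 then 1 else 0)))) := by
        apply List.map_congr_left
        intro ys _
        simp only [Function.comp_apply]
        have hcond : (pvMaskOf L (x :: ys) &&& m = 0) ↔ (pvMaskOf L ys &&& m = 0) := by
          show ((1 <<< (pvStopIdx L).getD x 0) ||| pvMaskOf L ys) &&& m = 0 ↔ _
          rw [pv_or_and_zero]
          simp [hb]
        rw [List.length_cons, pow_succ]
        by_cases hc : pvMaskOf L ys &&& m = 0
        · rw [if_pos (hcond.mpr hc), if_pos hc]; ring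
        · rw [if_neg (fun h => hc (hcond.mp h)), if_neg hc]; ring
      have hRHS : (if ∀ x' ∈ x :: r, 1 <<< (pvStopIdx L).getD x' 0 &&& m ≠ 0 then (1 : Int) else 0) = 0 := by
        apply if_neg
        intro hall
        exact hall x (by simp) hb
      rw [h2, List.sum_map_mul_left, ih hr m, hRHS]
      ring
    · have h2 : ((pvSubsets r).map ((fun Sl => (-1 : Int) ^ Sl.length * (if pvMaskOf L Sl &&& m = 0 then 1 else 0)) ∘ (fun ys => x :: ys)))
          = ((pvSubsets r).map (fun _ => (0 : Int))) := by
        apply List.map_congr_left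
        intro ys _
        simp only [Function.comp_apply]
        have hcond : ¬ (pvMaskOf L (x :: ys) &&& m = 0) := by
          show ¬(((1 <<< (pvStopIdx L).getD x 0) ||| pvMaskOf L ys) &&& m = 0)
          rw [pv_or_and_zero]
          exact fun h => hb h.1
        rw [if_neg hcond, mul_zero]
      rw [h2, ih hr m]
      have hsumzero : ((pvSubsets r).map (fun _ => (0 : Int))).sum = 0 := by
        simp
      have hiff : (∀ x' ∈ x :: r, (1 <<< (pvStopIdx L).getD x' 0) &&& m ≠ 0)
          ↔ (∀ x' ∈ r, (1 <<< (pvStopIdx L).getD x' 0) &&& m ≠ 0) := by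
        rw [List.forall_mem_cons]
        simp [hb]
      rw [hsumzero, add_zero, if_congr hiff rfl rfl]

lemma pvFull_iff (L : PySem.Set String) (hL : L.Nodup) (m : Nat) (hm : m < 2 ^ L.length) :
    ((∀ x ∈ L, (1 <<< (pvStopIdx L).getD x 0) &&& m ≠ 0) ↔ m = 2 ^ L.length - 1) := by
  constructor
  · intro h
    apply Nat.eq_of_testBit_eq
    intro i
    rw [Nat.testBit_two_pow_sub_one]
    by_cases hi : i < L.length
    · simp only [hi, decide_true]
      have hx : L[i]'hi ∈ L := List.getElem_mem hi
      have hidx : L.idxOf (L[i]'hi) = i := List.Nodup.idxOf_getElem hL i hi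
      have hne := h (L[i]'hi) hx
      rw [pvBit_eq L hL _ hx, hidx] at hne
      cases htb : m.testBit i
      · exact absurd ((pv_two_pow_and_eq_zero i m).mpr htb) hne
      · rfl
    · simp only [hi, decide_false]
      exact Nat.testBit_lt_two_pow
        (lt_of_lt_of_le hm (Nat.pow_le_pow_right (by norm_num) (le_of_not_gt hi)))
  · rintro rfl x hx
    rw [pvBit_eq L hL x hx]
    intro h0
    rw [pv_two_pow_and_eq_zero, Nat.testBit_two_pow_sub_one] at h0
    simp [List.idxOf_lt_length_of_mem hx] at h0

lemma pvMain (L : PySem.Set String) (hL : L.Nodup) (g : PySem.Dict String (List String))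
    (topo : List String) (s t : String) :
    ((pvSubsets L).foldl
      (fun total sub => total + (-1 : Int) ^ sub.length * pvCountPathsAvoiding g topo s t (PySem.Set.ofList sub)) 0)
      = ((topo.foldl (pvAStep g (pvStopIdx L)) (pvDP0 L s)).getD t PySem.Dict.empty).getD ((1 <<< L.length) - 1) 0 := by
  rw [PySem.List.foldl_add
    (g := fun sub => (-1 : Int) ^ sub.length * pvCountPathsAvoiding g topo s t (PySem.Set.ofList sub)),
    zero_add]
  have hcount : ∀ Sl ∈ pvSubsets L,
      (-1 : Int) ^ Sl.length * pvCountPathsAvoiding g topo s t (PySem.Set.ofList Sl)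
        = (-1 : Int) ^ Sl.length * pvSF (2 ^ L.length) (pvMaskOf L Sl)
            (pvInner (topo.foldl (pvAStep g (pvStopIdx L)) (pvDP0 L s)) t) := by
    intro Sl hSl
    rw [pvCount_eq L hL Sl (pvSubsets_mem_sublist L Sl hSl) g topo s t]
  rw [List.map_congr_left hcount]
  have hexp : ∀ Sl ∈ pvSubsets L,
      (-1 : Int) ^ Sl.length * pvSF (2 ^ L.length) (pvMaskOf L Sl)
          (pvInner (topo.foldl (pvAStep g (pvStopIdx L)) (pvDP0 L s)) t)
        = ∑ m ∈ Finset.range (2 ^ L.length),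
            (-1 : Int) ^ Sl.length * (if pvMaskOf L Sl &&& m = 0 then 1 else 0)
              * (pvInner (topo.foldl (pvAStep g (pvStopIdx L)) (pvDP0 L s)) t).getD m 0 := by
    intro Sl _
    unfold pvSF
    rw [Finset.mul_sum]
    apply Finset.sum_congr rfl
    intro m _
    by_cases hc : m &&& pvMaskOf L Sl = 0
    · have hc' : pvMaskOf L Sl &&& m = 0 := by rw [Nat.and_comm]; exact hc
      rw [if_pos hc, if_pos hc']
      ring
    · have hc' : ¬(pvMaskOf L Sl &&& m = 0) := by rw [Nat.and_comm]; exact hc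
      rw [if_neg hc, if_neg hc']
      ring
  rw [List.map_congr_left hexp, pvSwap]
  have hinner : ∀ m ∈ Finset.range (2 ^ L.length),
      ((pvSubsets L).map (fun Sl => (-1 : Int) ^ Sl.length * (if pvMaskOf L Sl &&& m = 0 then 1 else 0)
          * (pvInner (topo.foldl (pvAStep g (pvStopIdx L)) (pvDP0 L s)) t).getD m 0)).sum
        = (if m = 2 ^ L.length - 1
            then (pvInner (topo.foldl (pvAStep g (pvStopIdx L)) (pvDP0 L s)) t).getD m 0 else 0) := by
    intro m hm
    rw [List.sum_map_mul_right, pvPIE_ind L L (List.Sublist.refl L) m]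
    have hmlt : m < 2 ^ L.length := Finset.mem_range.mp hm
    have hiff : (∀ x ∈ L, (1 <<< (pvStopIdx L).getD x 0) &&& m ≠ 0) ↔ m = 2 ^ L.length - 1 :=
      pvFull_iff L hL m hmlt
    rw [if_congr hiff rfl rfl]
    by_cases hfull : m = 2 ^ L.length - 1
    · rw [if_pos hfull, if_pos hfull, one_mul]
    · rw [if_neg hfull, if_neg hfull, zero_mul]
  rw [Finset.sum_congr rfl hinner,
    Finset.sum_ite_eq' (Finset.range (2 ^ L.length)) (2 ^ L.length - 1)
      (fun m => (pvInner (topo.foldl (pvAStep g (pvStopIdx L)) (pvDP0 L s)) t).getD m 0)]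
  rw [if_pos (Finset.mem_range.mpr (Nat.sub_lt (Nat.two_pow_pos _) one_pos))]
  rw [Nat.one_shiftLeft]
  rfl

-- ===== VERDICT (by name: the statement is the Claim_ definition above) =====
theorem get_nb_paths_with_stops_spec : Claim_equal_get_nb_paths_with_stops := by
  intro graph s t stops _
  unfold Spec_get_nb_paths_with_stops get_nb_paths_with_stops get_nb_paths_with_stops_alt
  exact (pvMain (PySem.Set.ofList stops) (PySem.Set.nodup_ofList stops)
    (PySem.Dict.ofList graph) (pvTopologicalSort (PySem.Dict.ofList graph)) s t).symm
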